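-- pv_equiv track=rewrite | github.com/huggingface/jat | gia/processing/utils.py | split_and_pad_sequences
-- ===== SOURCE A (Python) =====
-- from typing import Any, Dict, List, Optional, Tuple, TypeVar
--
-- T = TypeVar("T")
--
-- def split_and_pad_sequences(
--     sequences: List[List[T]], max_len: int, pad_value: T
-- ) -> Tuple[List[List[T]], List[List[int]]]:
--     """
--     Splits input sequences into sub-sequences of length max_len and pads them if necessary.
--     Generates a mask indicating the padding positions.
--
--     Args:
--         sequences (List[List[T]]): A list of sequences, where each sequence is a list.
--         max_len (int): Maximum length for the output sub-sequences.
--         pad_value (T): Value to use for padding.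
--
--     Returns:
--         Tuple[List[List[T]], List[List[int]]]: padded_subsequences padded masks
--
--     Example:
--         >>> sequences = [[1, 2, 3, 4, 5], [6, 7, 8, 9]]
--         >>> out, mask = split_and_pad_sequences(sequences, max_len=3, pad_value=0)
--         >>> out
--         [[1, 2, 3], [4, 5, 0], [6, 7, 8], [9, 0, 0]]
--         >>> mask
--         [[1, 1, 1], [1, 1, 0], [1, 1, 1], [1, 0, 0]]
--     """
--     padded_subsequences = []
--     masks = []
--
--     for sequence in sequences:
--         for i in range(0, len(sequence), max_len):
--             # Take a subsequence of max_len elements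
--             subsequence = sequence[i : i + max_len]
--             mask = [1] * len(subsequence)
--
--             # If the subsequence is smaller than max_len, pad it
--             if len(subsequence) < max_len:
--                 padding_length = max_len - len(subsequence)
--                 subsequence += [pad_value] * padding_length
--                 mask += [0] * padding_length
--
--             padded_subsequences.append(subsequence)
--             masks.append(mask)
--
--     return padded_subsequences, masks
-- ===== SOURCE B (Python) =====
-- from typing import List, Tuple, TypeVar
--
-- T = TypeVar("T")
--
--
-- def split_and_pad_sequences(
--     sequences: List[List[T]], max_len: int, pad_value: T
-- ) -> Tuple[List[List[T]], List[List[int]]]: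
--     """Pad-then-reshape: pad each sequence up to a whole number of windows,
--     build one mask for the whole sequence, then slice both into windows."""
--     padded_subsequences = []
--     masks = []
--     for sequence in sequences:
--         num_windows = len(range(0, len(sequence), max_len))
--         pad_len = num_windows * max_len - len(sequence)
--         padded = sequence + [pad_value] * pad_len
--         mask = [1] * len(sequence) + [0] * pad_len
--         for i in range(num_windows):
--             padded_subsequences.append(padded[i * max_len : (i + 1) * max_len])
--             masks.append(mask[i * max_len : (i + 1) * max_len])
--     return padded_subsequences, masks
-- ===== Notes on version B (the rewrite author's own statement) =====
-- stated objective: alternative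
-- what changed: B pads each whole sequence once to a whole number of windows (count taken from len(range(0,len,max_len))), builds one full mask, and then slices both into consecutive max_len windows (pad-then-reshape), instead of A's per-chunk slice-then-pad interleaving.
import Mathlib
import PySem

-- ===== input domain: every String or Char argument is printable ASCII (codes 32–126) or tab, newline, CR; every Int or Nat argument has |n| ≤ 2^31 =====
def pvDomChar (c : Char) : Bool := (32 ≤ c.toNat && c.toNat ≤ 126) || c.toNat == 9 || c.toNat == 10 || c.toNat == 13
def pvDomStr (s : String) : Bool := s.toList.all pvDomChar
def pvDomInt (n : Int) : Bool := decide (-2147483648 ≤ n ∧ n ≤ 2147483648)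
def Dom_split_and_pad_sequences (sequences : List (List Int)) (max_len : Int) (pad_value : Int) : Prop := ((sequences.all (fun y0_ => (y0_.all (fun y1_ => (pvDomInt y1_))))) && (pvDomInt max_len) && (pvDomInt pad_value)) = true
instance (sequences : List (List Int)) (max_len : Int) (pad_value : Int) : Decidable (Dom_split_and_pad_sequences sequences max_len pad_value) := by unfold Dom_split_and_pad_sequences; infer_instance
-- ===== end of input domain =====

-- B pads each sequence once to a whole number of windows and slices; A slices then pads each chunk.

-- ===== PORT A =====
def split_and_pad_sequences (sequences : List (List Int)) (max_len : Int) (pad_value : Int) : List (List Int) × List (List Int) :=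
  sequences.foldl (fun acc sequence =>
    (PySem.List.pyRange 0 (sequence.length : Int) max_len).foldl (fun acc2 i =>
      let subsequence := PySem.List.slice sequence (some i) (some (i + max_len))
      let mask := List.replicate subsequence.length (1 : Int)
      if (subsequence.length : Int) < max_len then
        let padding_length := max_len - (subsequence.length : Int)
        (acc2.1 ++ [subsequence ++ List.replicate padding_length.toNat pad_value],
         acc2.2 ++ [mask ++ List.replicate padding_length.toNat (0 : Int)])
      else
        (acc2.1 ++ [subsequence], acc2.2 ++ [mask])) acc) ([], [])

-- ===== PORT B =====
def split_and_pad_sequences_alt (sequences : List (List Int)) (max_len : Int) (pad_value : Int) : List (List Int) × List (List Int) :=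
  sequences.foldl (fun acc sequence =>
    let num_windows := (PySem.List.pyRange 0 (sequence.length : Int) max_len).length
    let pad_len := ((num_windows : Int) * max_len - (sequence.length : Int)).toNat
    let padded := sequence ++ List.replicate pad_len pad_value
    let mask := List.replicate sequence.length (1 : Int) ++ List.replicate pad_len (0 : Int)
    (PySem.List.pyRange 0 (num_windows : Int) 1).foldl (fun acc2 i =>
      (acc2.1 ++ [PySem.List.slice padded (some (i * max_len)) (some ((i + 1) * max_len))],
       acc2.2 ++ [PySem.List.slice mask (some (i * max_len)) (some ((i + 1) * max_len))])) acc) ([], [])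

-- ===== PRECONDITION & SPEC =====
-- Pre_ excludes only max_len = 0 with a nonempty sequences list, where Python's range(0, len, 0) raises ValueError (both in A and in B).
def Pre_split_and_pad_sequences (sequences : List (List Int)) (max_len : Int) (pad_value : Int) : Prop :=
  max_len ≠ 0 ∨ sequences = []
instance (sequences : List (List Int)) (max_len : Int) (pad_value : Int) : Decidable (Pre_split_and_pad_sequences sequences max_len pad_value) := by unfold Pre_split_and_pad_sequences; infer_instance

def pvWitness_split_and_pad_sequences : List (List Int) × Int × Int := ([[1, 2, 3, 4, 5], [6, 7, 8, 9]], 3, 0)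

def Spec_split_and_pad_sequences (sequences : List (List Int)) (max_len : Int) (pad_value : Int) (out : List (List Int) × List (List Int)) : Prop := out = split_and_pad_sequences_alt sequences max_len pad_value
instance (sequences : List (List Int)) (max_len : Int) (pad_value : Int) (out : List (List Int) × List (List Int)) : Decidable (Spec_split_and_pad_sequences sequences max_len pad_value out) := by unfold Spec_split_and_pad_sequences; infer_instance

-- ===== CLAIM (what is proved, stated in full; the proofs are below) =====
def Claim_equal_split_and_pad_sequences : Prop := ∀ (sequences : List (List Int)) (max_len : Int) (pad_value : Int), Dom_split_and_pad_sequences sequences max_len pad_value → Pre_split_and_pad_sequences sequences max_len pad_value → Spec_split_and_pad_sequences sequences max_len pad_value (split_and_pad_sequences sequences max_len pad_value)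

-- ===== LEMMAS AND PROOFS =====

theorem window_eq (xs : List Int) (p : Int) (j m' N c : Nat)
    (h : j + m' ≤ N * m') (hn : xs.length ≤ N * m') (hc : c = N * m' - xs.length) :
    (((xs ++ List.replicate c p).drop j).take m')
      = (xs.drop j).take m' ++ List.replicate (m' - min m' (xs.length - j)) p := by
  subst hc
  rw [List.drop_append, List.take_append, List.drop_replicate, List.take_replicate]
  have hc : min (m' - (xs.drop j).length) (N * m' - xs.length - (j - xs.length))
      = m' - min m' (xs.length - j) := by
    rw [List.length_drop]; omega
  rw [hc]

theorem ceil_ge (n m' N : Nat) (hm : 0 < m')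
    (hlen : PySem.List.pyRange 0 (n : Int) (m' : Int)
      = (List.range N).map (fun (k : Nat) => 0 + (m' : Int) * (k : Int))) : n ≤ N * m' := by
  by_contra hcon
  push Not at hcon
  have hx : ((N * m' : Nat) : Int) ∈ PySem.List.pyRange 0 (n : Int) (m' : Int) := by
    rw [PySem.List.mem_pyRange_iff_of_pos (by exact_mod_cast hm)]
    refine ⟨by positivity, by exact_mod_cast hcon, ⟨(N : Int), by push_cast; ring⟩⟩
  rw [hlen, List.mem_map] at hx
  obtain ⟨k, hk, hEq⟩ := hx
  rw [List.mem_range] at hk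
  have hm0 : (m' : Int) ≠ 0 := by exact_mod_cast hm.ne'
  have h2 : (m' : Int) * k = m' * N := by push_cast at hEq ⊢; linarith
  have : (k : Int) = N := mul_left_cancel₀ hm0 h2
  omega

theorem inner_eq (sequence : List Int) (max_len pad_value : Int) (hm : max_len ≠ 0)
    (acc : List (List Int) × List (List Int)) :
    (PySem.List.pyRange 0 (sequence.length : Int) max_len).foldl (fun acc2 i =>
      let subsequence := PySem.List.slice sequence (some i) (some (i + max_len))
      let mask := List.replicate subsequence.length (1 : Int)
      if (subsequence.length : Int) < max_len then
        let padding_length := max_len - (subsequence.length : Int)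
        (acc2.1 ++ [subsequence ++ List.replicate padding_length.toNat pad_value],
         acc2.2 ++ [mask ++ List.replicate padding_length.toNat (0 : Int)])
      else
        (acc2.1 ++ [subsequence], acc2.2 ++ [mask])) acc
    = (let num_windows := (PySem.List.pyRange 0 (sequence.length : Int) max_len).length
       let pad_len := ((num_windows : Int) * max_len - (sequence.length : Int)).toNat
       let padded := sequence ++ List.replicate pad_len pad_value
       let mask := List.replicate sequence.length (1 : Int) ++ List.replicate pad_len (0 : Int)
       (PySem.List.pyRange 0 (num_windows : Int) 1).foldl (fun acc2 i =>
         (acc2.1 ++ [PySem.List.slice padded (some (i * max_len)) (some ((i + 1) * max_len))],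
          acc2.2 ++ [PySem.List.slice mask (some (i * max_len)) (some ((i + 1) * max_len))])) acc) := by
  rcases lt_or_gt_of_ne hm with hneg | hpos
  · have hnil : PySem.List.pyRange 0 (sequence.length : Int) max_len = [] := by
      simp [PySem.List.pyRange]
      intro _
      split_ifs <;> omega
    simp [hnil, PySem.List.pyRange_one_eq_nil le_rfl]
  · obtain ⟨m', rfl⟩ : ∃ m' : Nat, max_len = (m' : Int) :=
      ⟨max_len.toNat, (Int.toNat_of_nonneg hpos.le).symm⟩
    have hm'0 : 0 < m' := by exact_mod_cast hpos
    obtain ⟨acc1, acc2⟩ := acc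
    obtain ⟨N, hR⟩ : ∃ N, PySem.List.pyRange 0 (sequence.length : Int) (m' : Int)
        = (List.range N).map (fun (k : Nat) => 0 + (m' : Int) * (k : Int)) :=
      ⟨_, PySem.List.pyRange_of_pos _ _ hpos⟩
    have hnN : sequence.length ≤ N * m' := ceil_ge sequence.length m' N hm'0 hR
    have hpad : (((N : Int) * (m' : Int) - (sequence.length : Int)).toNat) = N * m' - sequence.length := by
      rw [show ((N : Int) * (m' : Int)) = ((N * m' : Nat) : Int) by push_cast; ring]
      omega
    rw [hR]
    simp only [List.length_map, List.length_range, hpad,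
      PySem.List.pyRange_zero_natCast N]
    rw [List.foldl_map, List.foldl_map]
    rw [PySem.List.foldl_congr_mem _ _ (fun (a : List (List Int) × List (List Int)) (k : Nat) =>
        (a.1 ++ [(fun i => if ((PySem.List.slice sequence (some i) (some (i + (m' : Int)))).length : Int) < (m' : Int) then
            PySem.List.slice sequence (some i) (some (i + (m' : Int))) ++ List.replicate ((m' : Int) - ((PySem.List.slice sequence (some i) (some (i + (m' : Int)))).length : Int)).toNat pad_value
          else PySem.List.slice sequence (some i) (some (i + (m' : Int)))) (0 + (m' : Int) * (k : Int))],
         a.2 ++ [(fun i => if ((PySem.List.slice sequence (some i) (some (i + (m' : Int)))).length : Int) < (m' : Int) then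
            List.replicate (PySem.List.slice sequence (some i) (some (i + (m' : Int)))).length (1 : Int) ++ List.replicate ((m' : Int) - ((PySem.List.slice sequence (some i) (some (i + (m' : Int)))).length : Int)).toNat (0 : Int)
          else List.replicate (PySem.List.slice sequence (some i) (some (i + (m' : Int)))).length (1 : Int)) (0 + (m' : Int) * (k : Int))]))
      _ (fun a k _ => by dsimp only; split_ifs <;> rfl)]
    refine PySem.List.foldl_congr_mem _ _ _ _ (fun a k hk => ?_)
    rw [List.mem_range] at hk
    dsimp only
    have e1 : (0 : Int) + (m' : Int) * (k : Int) = ((m' * k : Nat) : Int) := by push_cast; ring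
    have e3 : (k : Int) * (m' : Int) = ((m' * k : Nat) : Int) := by push_cast; ring
    have e4 : ((k : Int) + 1) * (m' : Int) = ((m' * k : Nat) : Int) + ((m' : Nat) : Int) := by
      push_cast; ring
    have hj : m' * k + m' ≤ N * m' := by
      have h1 : m' * (k + 1) ≤ m' * N := Nat.mul_le_mul_left _ hk
      rw [Nat.mul_succ, Nat.mul_comm m' N] at h1
      exact h1
    rw [e1, e3, e4, PySem.List.slice_natCast_add, PySem.List.slice_natCast_add,
      PySem.List.slice_natCast_add,
      window_eq sequence pad_value (m' * k) m' N _ hj hnN rfl,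
      window_eq (List.replicate sequence.length (1 : Int)) 0 (m' * k) m' N _ hj (by simpa using hnN) (by simp)]
    have hlen : ((sequence.drop (m' * k)).take m').length = min m' (sequence.length - m' * k) := by
      simp
    rw [List.drop_replicate, List.take_replicate]
    refine Prod.ext ?_ ?_ <;> dsimp only <;> congr 1
    · split_ifs with h
      · have h2 : ((m' : Int) - ((List.take m' (List.drop (m' * k) sequence)).length : Int)).toNat
            = m' - min m' (sequence.length - m' * k) := by rw [hlen]; omega
        rw [h2]
      · rw [hlen] at h
        have h3 : m' - min m' (sequence.length - m' * k) = 0 := by omega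
        rw [h3, List.replicate_zero, List.append_nil]
    · simp only [List.length_replicate]
      split_ifs with h
      · have h2 : ((m' : Int) - ((List.take m' (List.drop (m' * k) sequence)).length : Int)).toNat
            = m' - min m' (sequence.length - m' * k) := by rw [hlen]; omega
        rw [h2, hlen]
      · rw [hlen] at h
        have h3 : m' - min m' (sequence.length - m' * k) = 0 := by omega
        rw [h3, hlen, List.replicate_zero, List.append_nil]

-- ===== VERDICT (by name: the statement is the Claim_ definition above) =====
theorem split_and_pad_sequences_spec : Claim_equal_split_and_pad_sequences := by
  intro sequences max_len pad_value _ hpre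
  unfold Spec_split_and_pad_sequences split_and_pad_sequences split_and_pad_sequences_alt
  rcases hpre with hm | rfl
  · exact PySem.List.foldl_congr_mem _ _ _ _ (fun acc x _ => inner_eq x max_len pad_value hm acc)
  · rfl
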